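-- pv_equiv track=rewrite | github.com/georgeberry/bernie_vs_trump | src/hs_featureextraction.py | hate_dict_features
-- ===== SOURCE A (Python) =====
-- def hate_dict_features(hate_words, tweet):
--     """This function creates a feature vector based on the terms
--     in the hate words lexicon
--
--     This function takes a tweet and checks for matching terms in
--     the hate words list. It assigns a vector to the tweet
--     of the length of list, where nth entry == 1 iff nth term
--     is present in the tweet, else 0."""
--
--     ##Amend this to make format a data frame that can be extended
--     df = []
--     tweet = tweet.lower()
--     for term in hate_words:
--         #if term is in tweet + a space (to prevent over counting)
--         if term.lower()+' ' in tweet or ' '+term.lower() in tweet: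
--             df.append(1)
--         #if term is not in tweet we assign a 0
--         else:
--             df.append(0)
--     return df
-- ===== SOURCE B (Python) =====
-- def hate_dict_features(hate_words, tweet):
--     """Same feature vector, computed from the space positions: a qualifying
--     occurrence must touch a space, so collect the tweet's space indices once and
--     probe each term only right after / right before a space."""
--     t = tweet.lower()
--     spaces = [j for j, c in enumerate(t) if c == ' ']
--
--     def present(w):
--         L = len(w)
--         for j in spaces:
--             if t.startswith(w, j + 1) or (j >= L and t.startswith(w, j - L)):
--                 return 1
--         return 0
--
--     return [present(term.lower()) for term in hate_words]
-- ===== Notes on version B (the rewrite author's own statement) =====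
-- stated objective: faster
-- what changed: Instead of A's two padded-substring searches per term ('term+" " in tweet', '" "+term in tweet'), B collects the tweet's space positions once and, per term, only tests startswith right after each space and right before each space (a qualifying occurrence must touch a space).
import Mathlib
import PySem

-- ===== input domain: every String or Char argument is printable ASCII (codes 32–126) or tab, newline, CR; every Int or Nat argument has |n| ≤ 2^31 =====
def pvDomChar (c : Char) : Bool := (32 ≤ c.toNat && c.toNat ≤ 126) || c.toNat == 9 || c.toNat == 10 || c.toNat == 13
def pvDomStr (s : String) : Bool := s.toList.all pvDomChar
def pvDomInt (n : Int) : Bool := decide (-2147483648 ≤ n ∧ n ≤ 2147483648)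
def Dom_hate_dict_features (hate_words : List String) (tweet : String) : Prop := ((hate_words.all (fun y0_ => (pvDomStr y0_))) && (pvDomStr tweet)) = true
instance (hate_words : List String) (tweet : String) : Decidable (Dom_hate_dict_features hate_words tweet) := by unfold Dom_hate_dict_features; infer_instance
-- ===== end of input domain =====

-- B replaces A's two padded-substring scans per term by probing only the tweet's space
-- positions (collected once): a qualifying occurrence must touch a space.
-- Strings are handled on the List Char side (PySem.Chars), exact for the stated domain.

-- ===== PORT A =====
-- df = []; tweet = tweet.lower(); for term in hate_words:
--   if term.lower()+' ' in tweet or ' '+term.lower() in tweet: df.append(1) else: df.append(0)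
def hate_dict_features (hate_words : List String) (tweet : String) : List Int :=
  let t := PySem.Chars.lower tweet.toList
  hate_words.foldl (fun df term =>
    let w := PySem.Chars.lower term.toList
    df ++ [if (PySem.Chars.isIn (w ++ [' ']) t || PySem.Chars.isIn ([' '] ++ w) t) then (1 : Int) else 0]) []

-- ===== PORT B =====
-- present(w): for j in spaces:
--   if t.startswith(w, j + 1) or (j >= L and t.startswith(w, j - L)): return 1
--   return 0
-- t.startswith(w, p) with 0 ≤ p ≤ len(t) (as guarded here) is exactly 'w <+: t.drop p';
-- the early 'return 1' loop is List.any.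
def pvPresent (t : List Char) (spaces : List Int) (w : List Char) : Int :=
  if spaces.any (fun j =>
      decide (w <+: t.drop (j + 1).toNat) ||
      (decide ((w.length : Int) ≤ j) && decide (w <+: t.drop (j - (w.length : Int)).toNat)))
  then 1 else 0

-- spaces = [j for j, c in enumerate(t) if c == ' ']
def hate_dict_features_alt (hate_words : List String) (tweet : String) : List Int :=
  let t := PySem.Chars.lower tweet.toList
  let spaces := ((PySem.List.enumerate t 0).filter (fun p => p.2 == ' ')).map (fun p => p.1)
  hate_words.map (fun term => pvPresent t spaces (PySem.Chars.lower term.toList))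

-- ===== PRECONDITION & SPEC =====
def Spec_hate_dict_features (hate_words : List String) (tweet : String) (out : List Int) : Prop := out = hate_dict_features_alt hate_words tweet
instance (hate_words : List String) (tweet : String) (out : List Int) : Decidable (Spec_hate_dict_features hate_words tweet out) := by unfold Spec_hate_dict_features; infer_instance

-- ===== CLAIM (what is proved, stated in full; the proofs are below) =====
def Claim_equal_hate_dict_features : Prop := ∀ (hate_words : List String) (tweet : String), Dom_hate_dict_features hate_words tweet → Spec_hate_dict_features hate_words tweet (hate_dict_features hate_words tweet)

-- ===== LEMMAS AND PROOFS =====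

-- If t.drop k starts with c then k is in range and t[k] = c.
lemma pvDropHead (t : List Char) (k : Nat) (c : Char) (r : List Char) (h : t.drop k = c :: r) :
    ∃ hk : k < t.length, t[k] = c := by
  have h0 : (t.drop k)[0]? = t[k + 0]? := List.getElem?_drop
  rw [h] at h0
  simp only [List.getElem?_cons_zero, Nat.add_zero] at h0
  obtain ⟨hk, he⟩ := List.getElem?_eq_some_iff.1 h0.symm
  exact ⟨hk, he⟩

-- Occurrence characterisation: "w+' ' in t or ' '+w in t" holds iff w occurs
-- immediately after, or immediately before, some space position of t.
lemma pvOcc_iff (t w : List Char) :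
    ((w ++ [' ']) <:+: t ∨ ([' '] ++ w) <:+: t) ↔
    (∃ k : Nat, (∃ hk : k < t.length, t[k] = ' ') ∧
      (w <+: t.drop (k + 1) ∨ (w.length ≤ k ∧ w <+: t.drop (k - w.length)))) := by
  have key : ∀ (sub : List Char), sub <:+: t ↔ ∃ j, sub <+: t.drop j := by
    intro sub
    rw [← PySem.Chars.isIn_iff_infix, ← PySem.Chars.exists_prefix_drop_iff_isIn]
  constructor
  · rintro (h | h)
    · obtain ⟨j, hpre⟩ := (key _).1 h
      obtain ⟨s, hs⟩ := hpre
      have hd : t.drop (j + w.length) = ' ' :: s := by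
        rw [← List.drop_drop, ← hs, List.append_assoc, List.drop_left]; rfl
      obtain ⟨hk, hsp⟩ := pvDropHead t (j + w.length) ' ' s hd
      refine ⟨j + w.length, ⟨hk, hsp⟩, Or.inr ⟨by omega, ?_⟩⟩
      have he : j + w.length - w.length = j := by omega
      rw [he]
      exact ⟨[' '] ++ s, by rw [← List.append_assoc, hs]⟩
    · obtain ⟨j, hpre⟩ := (key _).1 h
      obtain ⟨s, hs⟩ := hpre
      have hs' : ' ' :: (w ++ s) = t.drop j := by rw [← hs]; rfl
      obtain ⟨hk, hsp⟩ := pvDropHead t j ' ' (w ++ s) hs'.symm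
      refine ⟨j, ⟨hk, hsp⟩, Or.inl ?_⟩
      have hd : t.drop (j + 1) = w ++ s := by
        rw [← List.drop_drop, ← hs', List.drop_one]; rfl
      exact ⟨s, hd.symm⟩
  · rintro ⟨k, ⟨hk, hsp⟩, hocc | ⟨hL, hocc⟩⟩
    · have hcons : t.drop k = ' ' :: t.drop (k + 1) := by
        rw [List.drop_eq_getElem_cons hk, hsp]
      obtain ⟨s, hs⟩ := hocc
      refine Or.inr ((key _).2 ⟨k, s, ?_⟩)
      rw [List.singleton_append, List.cons_append, hs, ← hcons]
    · obtain ⟨s, hs⟩ := hocc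
      have hse : s = t.drop k := by
        have : t.drop (k - w.length + w.length) = s := by
          rw [← List.drop_drop, ← hs, List.drop_left]
        rw [← this]
        congr 1
        omega
      have hcons : t.drop k = ' ' :: t.drop (k + 1) := by
        rw [List.drop_eq_getElem_cons hk, hsp]
      refine Or.inl ((key _).2 ⟨k - w.length, t.drop (k + 1), ?_⟩)
      rw [List.append_assoc, List.singleton_append, ← hcons, ← hse]
      exact hs
-- Membership in the ported space-index list.
lemma pvMemSpaces (t : List Char) (j : Int) :
    j ∈ ((PySem.List.enumerate t 0).filter (fun p => p.2 == ' ')).map (fun p => p.1)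
    ↔ ∃ k : Nat, (∃ hk : k < t.length, t[k] = ' ') ∧ j = (k : Int) := by
  simp only [List.mem_map, List.mem_filter, PySem.List.mem_enumerate_iff]
  constructor
  · rintro ⟨⟨a, c⟩, ⟨⟨k, hk, hp⟩, hc⟩, hj⟩
    obtain ⟨ha, hcc⟩ := Prod.mk.injEq .. ▸ hp
    simp only at hj hc
    refine ⟨k, ⟨hk, ?_⟩, ?_⟩
    · rw [hcc] at hc
      simpa using hc
    · omega
  · rintro ⟨k, ⟨hk, hsp⟩, hj⟩
    exact ⟨((k : Int), t[k]), ⟨⟨k, hk, by simp⟩, by simpa using hsp⟩, hj.symm⟩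

-- Per-term agreement of the two tests.
lemma pvPresent_eq (t w : List Char) :
    (if (PySem.Chars.isIn (w ++ [' ']) t || PySem.Chars.isIn ([' '] ++ w) t) then (1 : Int) else 0)
      = pvPresent t ((((PySem.List.enumerate t 0).filter (fun p => p.2 == ' ')).map (fun p => p.1))) w := by
  unfold pvPresent
  by_cases h : ((w ++ [' ']) <:+: t ∨ ([' '] ++ w) <:+: t)
  · rw [if_pos (by simp only [Bool.or_eq_true, PySem.Chars.isIn_iff_infix]; exact h),
       if_pos ?_]
    obtain ⟨k, hk, hd⟩ := (pvOcc_iff t w).1 h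
    refine List.any_eq_true.2 ⟨(k : Int), (pvMemSpaces t _).2 ⟨k, hk, rfl⟩, ?_⟩
    rcases hd with hocc | ⟨hL, hocc⟩
    · have he : ((k : Int) + 1).toNat = k + 1 := by omega
      simp only [he, Bool.or_eq_true, decide_eq_true_eq]
      exact Or.inl hocc
    · have he : ((k : Int) - (w.length : Int)).toNat = k - w.length := by omega
      simp only [he, Bool.or_eq_true, Bool.and_eq_true, decide_eq_true_eq]
      exact Or.inr ⟨by exact_mod_cast hL, hocc⟩
  · rw [if_neg (by simp only [Bool.or_eq_true, PySem.Chars.isIn_iff_infix]; exact h),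
       if_neg ?_]
    intro hany
    obtain ⟨j, hj, hp⟩ := List.any_eq_true.1 hany
    obtain ⟨k, hk, hjk⟩ := (pvMemSpaces t j).1 hj
    subst hjk
    refine h ((pvOcc_iff t w).2 ⟨k, hk, ?_⟩)
    have he1 : ((k : Int) + 1).toNat = k + 1 := by omega
    have he2 : ((k : Int) - (w.length : Int)).toNat = k - w.length := by omega
    simp only [he1, he2, Bool.or_eq_true, Bool.and_eq_true, decide_eq_true_eq] at hp
    rcases hp with hp | ⟨hL, hp⟩
    · exact Or.inl hp
    · exact Or.inr ⟨by exact_mod_cast hL, hp⟩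

-- ===== VERDICT (by name: the statement is the Claim_ definition above) =====
theorem hate_dict_features_spec : Claim_equal_hate_dict_features := by
  intro hate_words tweet _
  unfold Spec_hate_dict_features hate_dict_features hate_dict_features_alt
  rw [PySem.List.foldl_append_singleton_eq_map, List.nil_append]
  exact List.map_congr_left (fun term _ => pvPresent_eq _ _)
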